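-- pv_equiv track=rewrite | github.com/holzermarie/holzermarie.github.io | _2425_data/premiere/src/dictionnaires_td-c.py | depouillement
-- ===== SOURCE A (Python) =====
-- def est_present(tab, v):
--     for elmt in tab:
--         if elmt == v:
--             return True
--     return False
--
-- def depouillement(candidats, votes):
--     occurences = {cle:0 for cle in candidats}
--     occurences["Blanc"] = 0
--     occurences["Nul"] = 0
--     for v in votes:
--         if est_present(candidats, v):
--             occurences[v] += 1
--         elif v == "":
--             occurences["Blanc"] += 1
--         else:
--             occurences["Nul"] += 1
--     return occurences
-- ===== SOURCE B (Python) =====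
-- def depouillement(candidats, votes):
--     counts = {}
--     for v in votes:
--         counts[v] = counts.get(v, 0) + 1
--     result = {c: 0 for c in candidats}
--     result["Blanc"] = 0
--     result["Nul"] = 0
--     for v, n in counts.items():
--         if v in candidats:
--             result[v] += n
--         elif v == "":
--             result["Blanc"] += n
--         else:
--             result["Nul"] += n
--     return result
-- ===== Notes on version B (the rewrite author's own statement) =====
-- stated objective: faster
-- what changed: B first aggregates the votes into a frequency table (a hand-rolled Counter) and then dispatches once per DISTINCT vote value, adding whole counts into the candidate/Blanc/Nul buckets, instead of A's per-vote scan that re-runs a linear membership search over candidats and increments by 1 for every single ballot.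
import Mathlib
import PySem

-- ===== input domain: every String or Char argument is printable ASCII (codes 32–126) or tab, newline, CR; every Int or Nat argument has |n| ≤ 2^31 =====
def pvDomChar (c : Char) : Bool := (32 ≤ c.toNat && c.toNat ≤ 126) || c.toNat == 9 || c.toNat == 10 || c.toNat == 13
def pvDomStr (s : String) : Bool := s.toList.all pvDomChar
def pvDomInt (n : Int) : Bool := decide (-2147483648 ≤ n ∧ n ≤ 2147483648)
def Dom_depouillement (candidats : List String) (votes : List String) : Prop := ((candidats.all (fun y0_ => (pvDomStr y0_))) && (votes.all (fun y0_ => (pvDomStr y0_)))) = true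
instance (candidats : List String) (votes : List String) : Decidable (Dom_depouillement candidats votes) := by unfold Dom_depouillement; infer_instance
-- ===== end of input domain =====

-- B aggregates votes into a frequency dict first and dispatches once per distinct value (idiomatic Counter style); A scans vote by vote.


-- ===== PORT A =====
def est_present (tab : List String) (v : String) : Bool :=
  match tab with
  | [] => false
  | elmt :: rest => if elmt == v then true else est_present rest v

-- occurences[v] += 1 is ported as Dict.modify with default 0: the key is always present
-- (the dict was initialised from candidats plus "Blanc"/"Nul"), so no KeyError is reachable.
def depouillement (candidats : List String) (votes : List String) : List (String × Int) :=
  let occurences : PySem.Dict String Int :=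
    candidats.foldl (fun d cle => d.insert cle 0) PySem.Dict.empty
  let occurences := occurences.insert "Blanc" 0
  let occurences := occurences.insert "Nul" 0
  let occurences := votes.foldl (fun d v =>
    if est_present candidats v then d.modify v 0 (fun n => n + 1)
    else if v == "" then d.modify "Blanc" 0 (fun n => n + 1)
    else d.modify "Nul" 0 (fun n => n + 1)) occurences
  occurences.items

-- ===== PORT B =====
def depouillement_alt (candidats : List String) (votes : List String) : List (String × Int) :=
  let counts : PySem.Dict String Int :=
    votes.foldl (fun d v => d.insert v (d.getD v 0 + 1)) PySem.Dict.empty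
  let result : PySem.Dict String Int :=
    candidats.foldl (fun d c => d.insert c 0) PySem.Dict.empty
  let result := result.insert "Blanc" 0
  let result := result.insert "Nul" 0
  let result := counts.items.foldl (fun d p =>
    if candidats.contains p.1 then d.modify p.1 0 (fun n => n + p.2)
    else if p.1 == "" then d.modify "Blanc" 0 (fun n => n + p.2)
    else d.modify "Nul" 0 (fun n => n + p.2)) result
  result.items

-- ===== PRECONDITION & SPEC =====
def Spec_depouillement (candidats : List String) (votes : List String) (out : List (String × Int)) : Prop := out = depouillement_alt candidats votes
instance (candidats : List String) (votes : List String) (out : List (String × Int)) : Decidable (Spec_depouillement candidats votes out) := by unfold Spec_depouillement; infer_instance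

-- ===== CLAIM (what is proved, stated in full; the proofs are below) =====
def Claim_equal_depouillement : Prop := ∀ (candidats : List String) (votes : List String), Dom_depouillement candidats votes → Spec_depouillement candidats votes (depouillement candidats votes)

-- ===== LEMMAS AND PROOFS =====

-- the bucket a vote v is tallied into
def pvTarget (candidats : List String) (v : String) : String :=
  if candidats.contains v then v else if v = "" then "Blanc" else "Nul"

-- the initial dict both programs build
def pvInit (candidats : List String) : PySem.Dict String Int :=
  ((candidats.foldl (fun d c => d.insert c 0) PySem.Dict.empty).insert "Blanc" 0).insert "Nul" 0

lemma est_present_eq (tab : List String) (v : String) : est_present tab v = tab.contains v := by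
  induction tab with
  | nil => rfl
  | cons a rest ih =>
    simp [est_present, ih]
    by_cases h : a = v <;> simp [h]
    exact fun h' => absurd h'.symm h

lemma bodyA_eq (candidats : List String) :
    (fun (d : PySem.Dict String Int) v =>
      if est_present candidats v then d.modify v 0 (fun n => n + 1)
      else if v == "" then d.modify "Blanc" 0 (fun n => n + 1)
      else d.modify "Nul" 0 (fun n => n + 1))
    = fun d v => d.modify (pvTarget candidats v) 0 (fun n => n + (1 : Int)) := by
  funext d v
  simp only [pvTarget, est_present_eq, beq_iff_eq]
  split_ifs <;> rfl

lemma bodyB_eq (candidats : List String) :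
    (fun (d : PySem.Dict String Int) (p : String × Int) =>
      if candidats.contains p.1 then d.modify p.1 0 (fun n => n + p.2)
      else if p.1 == "" then d.modify "Blanc" 0 (fun n => n + p.2)
      else d.modify "Nul" 0 (fun n => n + p.2))
    = fun d p => d.modify (pvTarget candidats p.1) 0 (fun n => n + p.2) := by
  funext d p
  simp only [pvTarget, beq_iff_eq]
  split_ifs <;> rfl

lemma getD_fold_modify {β : Type} (t : β → String) (w : β → Int) (k : String) :
    ∀ (l : List β) (d : PySem.Dict String Int),
      (l.foldl (fun d x => d.modify (t x) 0 (fun n => n + w x)) d).getD k 0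
        = d.getD k 0 + ((l.filter (fun x => t x == k)).map w).sum := by
  intro l
  induction l with
  | nil => intro d; simp
  | cons x l ih =>
    intro d
    simp only [List.foldl_cons, ih, PySem.Dict.getD_modify, List.filter_cons]
    by_cases h : t x = k
    · simp [h]; omega
    · have h' : ¬ k = t x := fun hh => h hh.symm
      simp [h, h']

lemma keys_fold_modify {β : Type} (t : β → String) (w : β → Int) :
    ∀ (l : List β) (d : PySem.Dict String Int), (∀ x ∈ l, d.contains (t x) = true) →
      (l.foldl (fun d x => d.modify (t x) 0 (fun n => n + w x)) d).keys = d.keys := by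
  intro l
  induction l with
  | nil => intro d _; rfl
  | cons x l ih =>
    intro d h
    simp only [List.foldl_cons]
    rw [ih]
    · rw [PySem.Dict.keys_modify, PySem.Dict.keys_insert_of_contains]
      exact h x (by simp)
    · intro y hy
      rw [PySem.Dict.contains_modify]
      simp [h y (List.mem_cons_of_mem _ hy)]

lemma contains_init (candidats : List String) (v : String) :
    (pvInit candidats).contains (pvTarget candidats v) = true := by
  by_cases hc : candidats.contains v = true
  · rw [pvTarget, if_pos hc]
    have hv : v ∈ candidats := by simpa using hc
    have hk : v ∈ (candidats.foldl (fun d c => d.insert c (0 : Int)) PySem.Dict.empty).keys := by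
      rw [PySem.Dict.keys_foldl_insert]
      simp only [PySem.Dict.keys_empty, PySem.Set.update_nil_left]
      exact (PySem.Set.mem_ofList _ _).2 hv
    have hcc := (PySem.Dict.contains_iff_mem_keys _ v).2 hk
    unfold pvInit
    simp [PySem.Dict.contains_insert, hcc]
  · rw [pvTarget, if_neg hc]
    by_cases he : v = ""
    · rw [if_pos he]; unfold pvInit; simp [PySem.Dict.contains_insert]
    · rw [if_neg he]; unfold pvInit; simp

lemma nodup_init (candidats : List String) : (pvInit candidats).keys.Nodup := by
  unfold pvInit
  apply PySem.Dict.nodup_keys_insert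
  apply PySem.Dict.nodup_keys_insert
  exact PySem.Dict.nodup_keys_foldl_insert _ _ _ PySem.Dict.nodup_keys_empty

lemma sum_indicator (q : String → Bool) (x : String) (c : Int) :
    ∀ (S : List String), S.Nodup → x ∈ S →
      ((S.filter q).map (fun v => if v = x then c else 0)).sum = if q x then c else 0 := by
  intro S
  induction S with
  | nil => intro _ h; cases h
  | cons a S ih =>
    intro hnd hx
    have hndS := (List.nodup_cons.1 hnd).2
    have haS := (List.nodup_cons.1 hnd).1
    rcases List.mem_cons.1 hx with rfl | hx'
    · have hz : ((S.filter q).map (fun v => if v = x then c else 0)).sum = 0 := by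
        apply List.sum_eq_zero
        intro y hy
        rcases List.mem_map.1 hy with ⟨v, hv, rfl⟩
        have : v ≠ x := fun h => haS (h ▸ List.mem_of_mem_filter hv)
        simp [this]
      rw [List.filter_cons]
      by_cases hq : q x <;> simp [hq, hz]
    · have hax : a ≠ x := fun h => haS (h ▸ hx')
      rw [List.filter_cons]
      by_cases hq : q a <;> simp [hq, hax, ih hndS hx']

lemma count_sum (t : String → String) (k : String) (S : List String) (hnd : S.Nodup) :
    ∀ (l : List String), (∀ x ∈ l, x ∈ S) →
      ((S.filter (fun v => t v == k)).map (fun v => (l.count v : Int))).sum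
        = (l.countP (fun v => t v == k) : Int) := by
  intro l
  induction l with
  | nil =>
    intro _
    simp only [List.count_nil, List.countP_nil]
    exact List.sum_eq_zero (by intro y hy; rcases List.mem_map.1 hy with ⟨v, _, rfl⟩; rfl)
  | cons x l ih =>
    intro h
    have hx : x ∈ S := h x (by simp)
    have hl : ∀ y ∈ l, y ∈ S := fun y hy => h y (List.mem_cons_of_mem _ hy)
    have hcnt : ∀ v : String, ((x :: l).count v : Int)
        = (l.count v : Int) + (if v = x then (1 : Int) else 0) := by
      intro v
      by_cases hv : v = x
      · simp [hv]
      · simp [hv, Ne.symm hv]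
    calc ((S.filter (fun v => t v == k)).map (fun v => ((x :: l).count v : Int))).sum
        = ((S.filter (fun v => t v == k)).map
            (fun v => (l.count v : Int) + (if v = x then (1 : Int) else 0))).sum := by
          congr 1; exact List.map_congr_left (fun v _ => hcnt v)
      _ = ((S.filter (fun v => t v == k)).map (fun v => (l.count v : Int))).sum
          + ((S.filter (fun v => t v == k)).map (fun v => if v = x then (1 : Int) else 0)).sum := by
          rw [← List.sum_map_add]
      _ = (l.countP (fun v => t v == k) : Int) + (if t x == k then (1 : Int) else 0) := by
          rw [ih hl, sum_indicator _ _ _ S hnd hx]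
      _ = ((x :: l).countP (fun v => t v == k) : Int) := by
          rw [List.countP_cons]
          by_cases hq : t x == k <;> simp [hq]

-- ===== VERDICT (by name: the statement is the Claim_ definition above) =====
theorem depouillement_spec : Claim_equal_depouillement := by
  intro candidats votes _
  unfold Spec_depouillement depouillement depouillement_alt
  simp only []
  rw [bodyA_eq, bodyB_eq, PySem.Dict.foldl_insert_getD_add_one_eq_counter]
  have hinit : ((candidats.foldl (fun d cle => d.insert cle 0) PySem.Dict.empty).insert "Blanc" 0).insert "Nul" 0 = pvInit candidats := rfl
  rw [hinit]
  set t := pvTarget candidats with ht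
  have hcont : ∀ v : String, (pvInit candidats).contains (t v) = true := contains_init candidats
  have hkA : (votes.foldl (fun d v => d.modify (t v) 0 (fun n => n + (1:Int))) (pvInit candidats)).keys
      = (pvInit candidats).keys :=
    keys_fold_modify t (fun _ => 1) votes (pvInit candidats) (fun x _ => hcont x)
  have hkB : ((PySem.Dict.counter votes).items.foldl
        (fun d p => d.modify (t p.1) 0 (fun n => n + p.2)) (pvInit candidats)).keys
      = (pvInit candidats).keys :=
    keys_fold_modify (fun p => t p.1) Prod.snd _ (pvInit candidats) (fun x _ => hcont x.1)
  have hgd : ∀ k : String,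
      (votes.foldl (fun d v => d.modify (t v) 0 (fun n => n + (1:Int))) (pvInit candidats)).getD k 0
      = ((PySem.Dict.counter votes).items.foldl
          (fun d p => d.modify (t p.1) 0 (fun n => n + p.2)) (pvInit candidats)).getD k 0 := by
    intro k
    rw [getD_fold_modify, getD_fold_modify (fun p => t p.1) Prod.snd]
    congr 1
    rw [PySem.Dict.items_counter, List.filter_map, List.map_map]
    have : ((votes.filter (fun v => t v == k)).map (fun _ => (1:Int))).sum
        = (votes.countP (fun v => t v == k) : Int) := by
      rw [PySem.List.sum_map_const_int]; simp [List.countP_eq_length_filter]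
    rw [this, ← count_sum t k (PySem.Set.ofList votes) (PySem.Set.nodup_ofList _) votes
      (fun x hx => (PySem.Set.mem_ofList _ _).2 hx)]
    rfl
  rw [PySem.Dict.items_eq_map_keys _ (hkA ▸ nodup_init candidats) (0 : Int),
      PySem.Dict.items_eq_map_keys _ (hkB ▸ nodup_init candidats) (0 : Int),
      hkA, hkB]
  exact List.map_congr_left (fun k _ => by rw [hgd k])
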